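-- pv_equiv track=rewrite | github.com/Rafael-2109/frete-sistema | app/agente/services/improvement_suggester.py | _truncate_session_messages
-- ===== SOURCE A (Python) =====
-- from typing import Dict, Any, List
--
-- MAX_CHARS_PER_MESSAGE = 3000
--
-- def _truncate_session_messages(messages: List[Dict[str, Any]], max_chars: int) -> str:
--     """
--     Formata e trunca mensagens de UMA sessao.
--
--     Segue regra R3 (services/CLAUDE.md): 3K chars/msg, cap por sessao.
--     """
--     parts = []
--     total = 0
--
--     for msg in messages:
--         role = msg.get('role', '?')
--         content = msg.get('content', '')
--
--         if len(content) > MAX_CHARS_PER_MESSAGE: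
--             content = content[:MAX_CHARS_PER_MESSAGE] + '...[truncado]'
--
--         entry = f"[{role}]: {content}"
--         entry_len = len(entry)
--
--         if total + entry_len > max_chars:
--             parts.append('...[sessao truncada]')
--             break
--
--         parts.append(entry)
--         total += entry_len
--
--     return '\n'.join(parts)
-- ===== SOURCE B (Python) =====
-- from typing import Dict, Any, List
--
-- MAX_CHARS_PER_MESSAGE = 3000
--
-- def _format_entry(msg):
--     content = msg.get('content', '')
--     if len(content) > MAX_CHARS_PER_MESSAGE:
--         content = content[:MAX_CHARS_PER_MESSAGE] + '...[truncado]'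
--     return f"[{msg.get('role', '?')}]: {content}"
--
-- def _truncate_session_messages(messages: List[Dict[str, Any]], max_chars: int) -> str:
--     entries = [_format_entry(m) for m in messages]
--     prefix = []
--     total = 0
--     for e in entries:
--         total += len(e)
--         prefix.append(total)
--     # prefix sums are nondecreasing (lengths >= 0), so BINARY-SEARCH the first
--     # index whose running total strictly exceeds max_chars instead of scanning
--     lo, hi = 0, len(prefix)
--     while lo < hi:
--         mid = (lo + hi) // 2
--         if prefix[mid] > max_chars:
--             hi = mid
--         else:
--             lo = mid + 1
--     if lo == len(entries):
--         return '\n'.join(entries)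
--     return '\n'.join(entries[:lo] + ['...[sessao truncada]'])
-- ===== Notes on version B (the rewrite author's own statement) =====
-- stated objective: alternative
-- what changed: B formats all entries, builds the table of nondecreasing prefix sums of their lengths, and locates the cutoff by BINARY SEARCH over that table (valid because lengths are nonnegative) instead of A's accumulate-and-break linear loop; assembly is a slice join plus the sentinel only when the cutoff is interior.
import Mathlib
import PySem

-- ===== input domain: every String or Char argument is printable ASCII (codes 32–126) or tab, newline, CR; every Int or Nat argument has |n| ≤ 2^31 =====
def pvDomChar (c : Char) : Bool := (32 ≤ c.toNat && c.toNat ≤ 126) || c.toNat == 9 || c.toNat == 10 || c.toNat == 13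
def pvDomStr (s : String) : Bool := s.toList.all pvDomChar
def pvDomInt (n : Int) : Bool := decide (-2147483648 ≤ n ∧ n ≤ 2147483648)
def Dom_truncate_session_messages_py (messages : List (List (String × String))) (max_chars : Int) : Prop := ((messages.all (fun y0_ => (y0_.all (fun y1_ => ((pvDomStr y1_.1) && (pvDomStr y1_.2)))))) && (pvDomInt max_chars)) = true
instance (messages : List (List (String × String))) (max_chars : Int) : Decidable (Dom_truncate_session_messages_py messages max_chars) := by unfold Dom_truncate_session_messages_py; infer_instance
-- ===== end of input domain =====

-- B formats all entries, tabulates the prefix sums of their lengths, and finds the cutoff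
-- by BINARY SEARCH over that nondecreasing table; A accumulates and breaks inside one
-- linear loop. Same return value everywhere (alternative algorithm).

-- ===== PORT A =====
-- msg.get(k, dflt) on the association list (first match wins)
def pvGetD (m : List (String × String)) (k dflt : String) : String :=
  match m.find? (fun p => p.1 == k) with
  | some p => p.2
  | none => dflt

-- the loop of A: state = (parts, total); break modelled by returning early
def pvTruncGo (msgs : List (List (String × String))) (parts : List (List Char))
    (total : Int) (max_chars : Int) : List (List Char) :=
  match msgs with
  | [] => parts
  | msg :: rest =>
    let role := pvGetD msg "role" "?"
    let content0 := (pvGetD msg "content" "").toList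
    let content :=
      if (PySem.Chars.len content0 : Int) > 3000 then
        PySem.Chars.slice content0 none (some 3000) ++ "...[truncado]".toList
      else content0
    let entry := "[".toList ++ role.toList ++ "]: ".toList ++ content
    let entry_len : Int := PySem.Chars.len entry
    if total + entry_len > max_chars then
      parts ++ ["...[sessao truncada]".toList]
    else
      pvTruncGo rest (parts ++ [entry]) (total + entry_len) max_chars

def truncate_session_messages_py (messages : List (List (String × String))) (max_chars : Int) : String :=
  String.mk (PySem.Chars.join ['\n'] (pvTruncGo messages [] 0 max_chars))

-- ===== PORT B =====
-- _format_entry of Source B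
def pvFormatEntry (msg : List (String × String)) : List Char :=
  let content0 := (pvGetD msg "content" "").toList
  let content :=
    if (PySem.Chars.len content0 : Int) > 3000 then
      PySem.Chars.slice content0 none (some 3000) ++ "...[truncado]".toList
    else content0
  "[".toList ++ (pvGetD msg "role" "?").toList ++ "]: ".toList ++ content

-- the prefix-sum-building loop of Source B: state = (prefix, total)
def pvPrefixFold (ls : List Int) : List Int :=
  (ls.foldl (fun acc l => (acc.1 ++ [acc.2 + l], acc.2 + l)) (([] : List Int), (0 : Int))).1

-- the hand-written while-loop binary search of Source B (prefix[mid] via getD; mid always in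
-- range); structural fuel hi - lo bounds the iteration count, each step shrinks the interval
def pvBsearchGo (pre : List Int) (mx : Int) : Nat → Nat → Nat → Nat
  | 0, lo, _ => lo
  | fuel + 1, lo, hi =>
    if lo < hi then
      let mid := (lo + hi) / 2
      if pre.getD mid 0 > mx then pvBsearchGo pre mx fuel lo mid
      else pvBsearchGo pre mx fuel (mid + 1) hi
    else lo

def pvBsearch (pre : List Int) (mx : Int) (lo hi : Nat) : Nat :=
  pvBsearchGo pre mx (hi - lo) lo hi

def truncate_session_messages_py_alt (messages : List (List (String × String))) (max_chars : Int) : String :=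
  let entries := messages.map pvFormatEntry
  let pref := pvPrefixFold (entries.map (fun e => (PySem.Chars.len e : Int)))
  let lo := pvBsearch pref max_chars 0 pref.length
  if lo = entries.length then String.mk (PySem.Chars.join ['\n'] entries)
  else String.mk (PySem.Chars.join ['\n'] (entries.take lo ++ ["...[sessao truncada]".toList]))

-- ===== PRECONDITION & SPEC =====
def Spec_truncate_session_messages_py (messages : List (List (String × String))) (max_chars : Int) (out : String) : Prop := out = truncate_session_messages_py_alt messages max_chars
instance (messages : List (List (String × String))) (max_chars : Int) (out : String) : Decidable (Spec_truncate_session_messages_py messages max_chars out) := by unfold Spec_truncate_session_messages_py; infer_instance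

-- ===== CLAIM =====
def Claim_equal_truncate_session_messages_py : Prop := ∀ (messages : List (List (String × String))) (max_chars : Int), Dom_truncate_session_messages_py messages max_chars → Spec_truncate_session_messages_py messages max_chars (truncate_session_messages_py messages max_chars)

-- ===== LEMMAS AND PROOFS =====

-- running prefix sums starting from t
def pvPre (t : Int) : List Int → List Int
  | [] => []
  | l :: ls => (t + l) :: pvPre (t + l) ls

-- first index of pre whose value exceeds mx (length if none)
def pvCutN (pre : List Int) (mx : Int) : Nat :=
  match pre with
  | [] => 0
  | t :: rest => if t > mx then 0 else pvCutN rest mx + 1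

-- the cutoff index for entry list es starting from running total `total`
def pvCutOf (total mx : Int) (es : List (List Char)) : Nat :=
  pvCutN (pvPre total (es.map (fun e => (PySem.Chars.len e : Int)))) mx

-- assembly of the result list from entries and cutoff
def pvAssemble (es : List (List Char)) (c : Nat) : List (List Char) :=
  if c = es.length then es else es.take c ++ ["...[sessao truncada]".toList]

theorem pvPre_length (ls : List Int) (t : Int) : (pvPre t ls).length = ls.length := by
  induction ls generalizing t with
  | nil => rfl
  | cons l ls ih => simp [pvPre, ih]

theorem pvPrefixFold_go (ls : List Int) (acc : List Int) (t : Int) :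
    (ls.foldl (fun acc l => (acc.1 ++ [acc.2 + l], acc.2 + l)) (acc, t)).1 = acc ++ pvPre t ls := by
  induction ls generalizing acc t with
  | nil => simp [pvPre]
  | cons l ls ih => simp [List.foldl_cons, ih, pvPre]

theorem pvPrefixFold_eq (ls : List Int) : pvPrefixFold ls = pvPre 0 ls := by
  simpa [pvPrefixFold] using pvPrefixFold_go ls [] 0

theorem pvCutN_le_length (pre : List Int) (mx : Int) : pvCutN pre mx ≤ pre.length := by
  induction pre with
  | nil => simp [pvCutN]
  | cons t rest ih =>
    by_cases h : t > mx
    · simp [pvCutN, h]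
    · simp only [pvCutN, if_neg h, List.length_cons]
      omega

theorem pvCutN_le_of_gt (pre : List Int) (mx : Int) (j : Nat)
    (hgt : pre.getD j 0 > mx) : pvCutN pre mx ≤ j := by
  induction pre generalizing j with
  | nil => simp [pvCutN]
  | cons t rest ih =>
    by_cases h : t > mx
    · simp [pvCutN, h]
    · cases j with
      | zero => simp [List.getD] at hgt; omega
      | succ j' =>
        simp only [pvCutN, if_neg h]
        have := ih j' (by simpa [List.getD] using hgt)
        omega

theorem pvCutN_gt_of_lt (pre : List Int) (mx : Int)
    (h : pvCutN pre mx < pre.length) : pre.getD (pvCutN pre mx) 0 > mx := by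
  induction pre with
  | nil => simp [pvCutN] at h
  | cons t rest ih =>
    by_cases hh : t > mx
    · simpa [pvCutN, hh, List.getD] using hh
    · simp only [pvCutN, if_neg hh, List.length_cons] at h ⊢
      have := ih (by omega)
      simpa [List.getD] using this

theorem pvPre_ge (ls : List Int) (t : Int) (hn : ∀ l ∈ ls, 0 ≤ l) :
    ∀ x ∈ pvPre t ls, t ≤ x := by
  induction ls generalizing t with
  | nil => simp [pvPre]
  | cons l ls ih =>
    intro x hx
    have hl : 0 ≤ l := hn l (List.mem_cons_self ..)
    rcases (List.mem_cons.mp hx) with h | h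
    · omega
    · have := ih (t + l) (fun a ha => hn a (List.mem_cons_of_mem _ ha)) x h
      omega

theorem pvPre_mono (ls : List Int) (t : Int) (hn : ∀ l ∈ ls, 0 ≤ l) :
    ∀ i j, i ≤ j → j < (pvPre t ls).length →
      (pvPre t ls).getD i 0 ≤ (pvPre t ls).getD j 0 := by
  induction ls generalizing t with
  | nil => simp [pvPre]
  | cons l ls ih =>
    intro i j hij hj
    cases i with
    | zero =>
      cases j with
      | zero => simp
      | succ j' =>
        simp only [pvPre, List.getD_cons_zero, List.getD_cons_succ]
        simp only [pvPre, List.length_cons] at hj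
        have hj' : j' < (pvPre (t + l) ls).length := by omega
        have hmem : (pvPre (t + l) ls).getD j' 0 ∈ pvPre (t + l) ls := by
          rw [List.getD_eq_getElem _ _ hj']
          exact List.getElem_mem hj'
        exact pvPre_ge ls (t + l) (fun a ha => hn a (List.mem_cons_of_mem _ ha)) _ hmem
    | succ i' =>
      cases j with
      | zero => omega
      | succ j' =>
        simp only [pvPre, List.getD_cons_succ]
        simp only [pvPre, List.length_cons] at hj
        exact ih (t + l) (fun a ha => hn a (List.mem_cons_of_mem _ ha)) i' j'
          (by omega) (by omega)

-- binary search over a nondecreasing list finds exactly the first-exceeding index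
theorem pvBsearchGo_eq (pre : List Int) (mx : Int)
    (hmono : ∀ i j, i ≤ j → j < pre.length → pre.getD i 0 ≤ pre.getD j 0) :
    ∀ (fuel lo hi : Nat), hi - lo ≤ fuel → lo ≤ pvCutN pre mx → pvCutN pre mx ≤ hi →
      hi ≤ pre.length → pvBsearchGo pre mx fuel lo hi = pvCutN pre mx := by
  intro fuel
  induction fuel with
  | zero =>
    intro lo hi hfuel hlo hhi _
    simp only [pvBsearchGo]
    omega
  | succ n ih =>
    intro lo hi hfuel hlo hhi hlen
    simp only [pvBsearchGo]
    by_cases hlh : lo < hi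
    · rw [if_pos hlh]
      by_cases hp : pre.getD ((lo + hi) / 2) 0 > mx
      · simp only [if_pos hp]
        have hcut : pvCutN pre mx ≤ (lo + hi) / 2 := pvCutN_le_of_gt pre mx _ hp
        exact ih lo ((lo + hi) / 2) (by omega) hlo hcut (by omega)
      · simp only [if_neg hp]
        have hcut : (lo + hi) / 2 < pvCutN pre mx := by
          by_contra hc
          push_neg at hc
          by_cases hend : pvCutN pre mx < pre.length
          · have h1 := pvCutN_gt_of_lt pre mx hend
            have h2 := hmono (pvCutN pre mx) ((lo + hi) / 2) hc (by omega)
            omega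
          · have := pvCutN_le_length pre mx
            omega
        exact ih ((lo + hi) / 2 + 1) hi (by omega) (by omega) hhi hlen
    · rw [if_neg hlh]
      omega

theorem pvCutOf_cons (e : List Char) (es : List (List Char)) (total mx : Int) :
    pvCutOf total mx (e :: es) =
      if total + (PySem.Chars.len e : Int) > mx then 0
      else pvCutOf (total + (PySem.Chars.len e : Int)) mx es + 1 := by
  simp [pvCutOf, pvPre, pvCutN]

theorem pvAssemble_zero (e : List Char) (es : List (List Char)) :
    pvAssemble (e :: es) 0 = ["...[sessao truncada]".toList] := by
  simp [pvAssemble]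

theorem pvAssemble_succ (e : List Char) (es : List (List Char)) (c : Nat) :
    pvAssemble (e :: es) (c + 1) = e :: pvAssemble es c := by
  by_cases h : c = es.length
  · simp [pvAssemble, h]
  · simp only [pvAssemble, List.length_cons, if_neg h, if_neg (by omega : ¬ c + 1 = es.length + 1)]
    simp [List.take_succ_cons]

-- A's loop computes, relative to any (parts, total), exactly the cutoff-prefix assembly
theorem pvTruncGo_eq (msgs : List (List (String × String))) (parts : List (List Char))
    (total : Int) (mx : Int) :
    pvTruncGo msgs parts total mx =
      parts ++ pvAssemble (msgs.map pvFormatEntry) (pvCutOf total mx (msgs.map pvFormatEntry)) := by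
  induction msgs generalizing parts total with
  | nil => simp [pvTruncGo, pvAssemble, pvCutOf, pvPre, pvCutN]
  | cons msg rest ih =>
    rw [List.map_cons, pvCutOf_cons]
    by_cases h : total + (PySem.Chars.len (pvFormatEntry msg) : Int) > mx
    · rw [if_pos h]
      simp only [pvTruncGo]
      rw [if_pos (by simpa [pvFormatEntry] using h)]
      rw [pvAssemble_zero]
    · rw [if_neg h]
      simp only [pvTruncGo]
      rw [if_neg (by simpa [pvFormatEntry] using h)]
      have hlen : ("[".toList ++ (pvGetD msg "role" "?").toList ++ "]: ".toList ++
          (if (PySem.Chars.len (pvGetD msg "content" "").toList : Int) > 3000 then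
            PySem.Chars.slice (pvGetD msg "content" "").toList none (some 3000) ++ "...[truncado]".toList
          else (pvGetD msg "content" "").toList)) = pvFormatEntry msg := by
        simp [pvFormatEntry]
      rw [hlen, ih, pvAssemble_succ, List.append_assoc]
      rfl

-- B's value equals the same cutoff-prefix assembly
theorem pvAlt_eq (messages : List (List (String × String))) (mx : Int) :
    truncate_session_messages_py_alt messages mx =
      String.mk (PySem.Chars.join ['\n']
        (pvAssemble (messages.map pvFormatEntry) (pvCutOf 0 mx (messages.map pvFormatEntry)))) := by
  unfold truncate_session_messages_py_alt
  simp only [pvPrefixFold_eq]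
  have hnn : ∀ l ∈ (messages.map pvFormatEntry).map (fun e => (PySem.Chars.len e : Int)), 0 ≤ l := by
    intro l hl
    simp only [List.mem_map] at hl
    obtain ⟨e, _, rfl⟩ := hl
    simp [PySem.Chars.len_eq]
  have hb := pvBsearchGo_eq
    (pvPre 0 ((messages.map pvFormatEntry).map (fun e => (PySem.Chars.len e : Int)))) mx
    (pvPre_mono _ 0 hnn)
    (pvPre 0 ((messages.map pvFormatEntry).map (fun e => (PySem.Chars.len e : Int)))).length
    0
    (pvPre 0 ((messages.map pvFormatEntry).map (fun e => (PySem.Chars.len e : Int)))).length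
    (by omega) (by omega) (pvCutN_le_length _ mx) (le_refl _)
  have hb' : pvBsearch (pvPre 0 ((messages.map pvFormatEntry).map (fun e => (PySem.Chars.len e : Int)))) mx
      0 (pvPre 0 ((messages.map pvFormatEntry).map (fun e => (PySem.Chars.len e : Int)))).length
      = pvCutN (pvPre 0 ((messages.map pvFormatEntry).map (fun e => (PySem.Chars.len e : Int)))) mx := by
    simp only [pvBsearch, Nat.sub_zero]
    exact hb
  rw [hb']
  have hl : (pvPre 0 ((messages.map pvFormatEntry).map (fun e => (PySem.Chars.len e : Int)))).length
      = (messages.map pvFormatEntry).length := by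
    rw [pvPre_length, List.length_map]
  by_cases hc : pvCutN (pvPre 0 ((messages.map pvFormatEntry).map (fun e => (PySem.Chars.len e : Int)))) mx
      = (messages.map pvFormatEntry).length
  · rw [if_pos hc]
    unfold pvAssemble pvCutOf
    rw [if_pos hc]
  · rw [if_neg hc]
    unfold pvAssemble pvCutOf
    rw [if_neg hc]

-- ===== VERDICT =====
theorem truncate_session_messages_py_spec : Claim_equal_truncate_session_messages_py := by
  intro messages max_chars _
  unfold Spec_truncate_session_messages_py truncate_session_messages_py
  rw [pvTruncGo_eq, pvAlt_eq, List.nil_append]
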